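-- pv_equiv track=rewrite | github.com/LyenC2C/sparkdata | zlj/project/task/cnn/cnn_train.py | words_simmilar_score
-- ===== SOURCE A (Python) =====
-- def word_simialr_score(s1, s2):
--     score = 0
--     for j in range(len(s1)):
--         if s1[j] == s2[j]:
--             score += 1
--     return score
--
-- def words_simmilar_score(word, words):
--     word_score = {}
--     for Word in words:
--         ws = word_simialr_score(word, Word)
--         if ws not in word_score.keys():
--             word_score[ws] = [Word]
--         else:
--             word_score[ws].append(Word)
--     return word_score
-- ===== SOURCE B (Python) =====
-- def _score(word, W):
--     # same index-based comparison as A: raises IndexError when W is shorter than word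
--     return sum(1 for j in range(len(word)) if word[j] == W[j])
--
-- def words_simmilar_score(word, words):
--     scores = [_score(word, W) for W in words]
--     return {s: [W for W, t in zip(words, scores) if t == s]
--             for s in dict.fromkeys(scores)}
-- ===== Notes on version B (the rewrite author's own statement) =====
-- stated objective: idiomatic
-- what changed: Replaces the streaming dict-mutation grouping (membership test then insert-or-append per word) by a two-pass comprehension: compute all scores once, dedupe them with dict.fromkeys for the key order, and build each group by filtering the score-annotated word list.
import Mathlib
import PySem

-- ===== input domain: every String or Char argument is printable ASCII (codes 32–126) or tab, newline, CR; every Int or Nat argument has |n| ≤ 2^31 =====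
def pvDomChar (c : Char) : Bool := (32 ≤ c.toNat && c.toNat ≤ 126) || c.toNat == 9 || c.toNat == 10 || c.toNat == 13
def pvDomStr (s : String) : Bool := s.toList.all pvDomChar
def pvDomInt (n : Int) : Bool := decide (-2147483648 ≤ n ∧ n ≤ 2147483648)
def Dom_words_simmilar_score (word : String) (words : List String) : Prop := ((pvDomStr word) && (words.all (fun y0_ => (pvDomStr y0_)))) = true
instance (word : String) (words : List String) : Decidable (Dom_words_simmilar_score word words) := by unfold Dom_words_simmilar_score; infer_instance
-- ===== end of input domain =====

-- B replaces A's streaming dict-mutation grouping by a two-pass comprehension (score list, ordered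
-- dedup of scores, one filter per distinct score); same cost, more idiomatic.


-- ===== PORT A =====
-- score loop: for j in range(len(s1)): if s1[j] == s2[j]: score += 1
-- (inside Pre_ both indexings are in range; pyGet? equality then matches Python's char comparison)
def word_simialr_score (s1 s2 : String) : Int :=
  (PySem.List.pyRange 0 (PySem.Str.len s1) 1).foldl
    (fun score j => if PySem.Str.pyGet? s1 j = PySem.Str.pyGet? s2 j then score + 1 else score) 0

def words_simmilar_score (word : String) (words : List String) : List (Int × List String) :=
  (words.foldl
    (fun (d : PySem.Dict Int (List String)) W =>
      let ws := word_simialr_score word W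
      if ws ∉ PySem.Dict.keys d then d.insert ws [W]
      else d.modify ws [] (fun v => v ++ [W]))
    PySem.Dict.empty).items

-- ===== PORT B =====
-- sum(1 for j in range(len(word)) if word[j] == W[j])
def pvScoreB (word W : String) : Int :=
  (((PySem.List.pyRange 0 (PySem.Str.len word) 1).filter
      (fun j => PySem.Str.pyGet? word j == PySem.Str.pyGet? W j)).length : Int)

def words_simmilar_score_alt (word : String) (words : List String) : List (Int × List String) :=
  let scores := words.map (fun W => pvScoreB word W)
  (PySem.List.dedup scores).map
    (fun s => (s, ((words.zip scores).filter (fun p => p.2 == s)).map (fun p => p.1)))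

-- ===== PRECONDITION & SPEC =====
-- Pre_: every word in the list is at least as long as the reference word; otherwise A's
-- s2[j] raises IndexError (and B raises the same way).
def Pre_words_simmilar_score (word : String) (words : List String) : Prop :=
  ∀ W ∈ words, PySem.Str.len word ≤ PySem.Str.len W
instance (word : String) (words : List String) : Decidable (Pre_words_simmilar_score word words) := by
  unfold Pre_words_simmilar_score; infer_instance

def pvWitness_words_simmilar_score : String × List String := ("ab", ["ab", "cd", "axx", "ba"])

def Spec_words_simmilar_score (word : String) (words : List String) (out : List (Int × List String)) : Prop := out = words_simmilar_score_alt word words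
instance (word : String) (words : List String) (out : List (Int × List String)) : Decidable (Spec_words_simmilar_score word words out) := by unfold Spec_words_simmilar_score; infer_instance

-- ===== CLAIM (what is proved, stated in full; the proofs are below) =====
def Claim_equal_words_simmilar_score : Prop := ∀ (word : String) (words : List String), Dom_words_simmilar_score word words → Pre_words_simmilar_score word words → Spec_words_simmilar_score word words (words_simmilar_score word words)

-- ===== LEMMAS AND PROOFS =====

-- Both scoring loops are the same count of matching positions.
theorem pvScore_eq (s1 s2 : String) : word_simialr_score s1 s2 = pvScoreB s1 s2 := by
  unfold word_simialr_score pvScoreB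
  rw [PySem.List.foldl_ite_add_one]
  rw [← List.countP_eq_length_filter]
  simp only [Int.zero_add, Int.natCast_inj]
  apply List.countP_congr
  intro j _
  by_cases h : PySem.Str.pyGet? s1 j = PySem.Str.pyGet? s2 j <;> simp

-- zipping a list with its own mapped scores, filtering on the score, projecting back
-- is just filtering the list on its score.
theorem pvZipFilter (f : String → Int) (s : Int) (l : List String) :
    ((l.zip (l.map f)).filter (fun p => p.2 == s)).map (fun p => p.1)
      = l.filter (fun W => f W == s) := by
  induction l with
  | nil => simp
  | cons a t ih =>
    simp only [List.map_cons, List.zip_cons_cons, List.filter_cons]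
    by_cases h : f a == s <;> simp [h, ih]

-- first-match lookup in an association list whose values are a function of the key
theorem pvGetD_keyed (g : Int → List String) (ks : List Int) (k : Int) (hk : k ∈ ks) :
    PySem.Dict.getD ⟨ks.map (fun s => (s, g s))⟩ k [] = g k := by
  induction ks with
  | nil => simp at hk
  | cons a t ih =>
    simp only [List.map_cons, PySem.Dict.getD, PySem.Dict.get?]
    by_cases h : a = k
    · subst h
      rw [List.find?_cons_of_pos (by simp)]
      simp
    · rw [List.find?_cons_of_neg (by simpa using h)]
      have hk' : k ∈ t := by
        rcases List.mem_cons.mp hk with h' | h'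
        · exact absurd h'.symm h
        · exact h'
      simpa [PySem.Dict.getD, PySem.Dict.get?, PySem.Dict.items] using ih hk'

theorem pvContains_keyed (g : Int → List String) (ks : List Int) (k : Int) :
    PySem.Dict.contains ⟨ks.map (fun s => (s, g s))⟩ k = true ↔ k ∈ ks := by
  simp [PySem.Dict.contains, List.any_eq_true]

-- the grouping invariant: A's fold over a prefix is the dict described by B's comprehension
theorem pvFoldItems (f : String → Int) (l : List String) :
    (l.foldl
      (fun (d : PySem.Dict Int (List String)) W =>
        if f W ∉ PySem.Dict.keys d then d.insert (f W) [W]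
        else d.modify (f W) [] (fun v => v ++ [W]))
      PySem.Dict.empty)
    = ⟨(PySem.List.dedup (l.map f)).map (fun s => (s, l.filter (fun W => f W == s)))⟩ := by
  induction l using List.reverseRecOn with
  | nil => simp [PySem.Dict.empty, PySem.List.dedup, PySem.Set.ofList, PySem.Set.empty]
  | append_singleton l W ih =>
    rw [List.foldl_append, List.foldl_cons, List.foldl_nil, ih]
    have hkeys : PySem.Dict.keys (⟨(PySem.List.dedup (l.map f)).map (fun s => (s, l.filter (fun W => f W == s)))⟩ : PySem.Dict Int (List String)) = PySem.List.dedup (l.map f) := by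
      simp [PySem.Dict.keys, Function.comp_def]
    have hdedup : PySem.List.dedup ((l ++ [W]).map f)
        = PySem.Set.add (PySem.List.dedup (l.map f)) (f W) := by
      simp only [List.map_append, List.map_cons, List.map_nil, PySem.List.dedup]
      exact PySem.Set.ofList_append_singleton _ _
    by_cases hmem : f W ∈ l.map f
    · -- modify branch: key present, value appended in place
      have hmem' : f W ∈ PySem.List.dedup (l.map f) := by
        simpa [PySem.List.dedup, PySem.Set.mem_ofList] using hmem
      rw [hkeys]
      simp only [hmem', not_true_eq_false, if_false]
      rw [hdedup, PySem.Set.add_of_mem hmem']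
      unfold PySem.Dict.modify
      rw [pvGetD_keyed _ _ _ hmem']
      unfold PySem.Dict.insert
      rw [if_pos ((pvContains_keyed _ _ _).mpr hmem')]
      simp only [List.map_map]
      congr 1
      apply List.map_congr_left
      intro s hs
      simp only [Function.comp_apply]
      by_cases hsk : s = f W
      · subst hsk
        simp [List.filter_append]
      · have h1 : ¬ (s == f W) = true := by simpa using hsk
        have h2 : ¬ (f W == s) = true := by simpa using Ne.symm hsk
        simp [h1, h2, List.filter_append]
    · -- insert branch: new key appended at the end
      have hmem' : f W ∉ PySem.List.dedup (l.map f) := by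
        simpa [PySem.List.dedup, PySem.Set.mem_ofList] using hmem
      rw [hkeys]
      simp only [hmem', not_false_eq_true, if_true]
      rw [hdedup, PySem.Set.add_of_not_mem hmem']
      unfold PySem.Dict.insert
      rw [if_neg (by simp only [Bool.not_eq_true]; rw [← Bool.not_eq_true]; exact fun hc => hmem' ((pvContains_keyed _ _ _).mp hc))]
      have hempty : l.filter (fun x => f x == f W) = [] := by
        rw [List.filter_eq_nil_iff]
        intro x hx
        simp only [beq_iff_eq]
        intro hfx
        exact hmem (by rw [← hfx]; exact List.mem_map_of_mem hx)
      simp only [List.map_append, List.map_cons, List.map_nil]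
      congr 1
      congr 1
      · apply List.map_congr_left
        intro s hs
        have hsne : s ≠ f W := by
          rintro rfl
          exact hmem' hs
        have h2 : ¬ (f W == s) = true := by simpa using Ne.symm hsne
        simp [List.filter_append, h2]
      · simp [List.filter_append, hempty]

-- ===== VERDICT (by name: the statement is the Claim_ definition above) =====
theorem words_simmilar_score_spec : Claim_equal_words_simmilar_score := by
  unfold Claim_equal_words_simmilar_score
  intro word words _ _
  unfold Spec_words_simmilar_score words_simmilar_score words_simmilar_score_alt
  have hsc : ∀ W, word_simialr_score word W = pvScoreB word W := pvScore_eq word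
  simp only [hsc]
  rw [pvFoldItems (fun W => pvScoreB word W) words]
  apply List.map_congr_left
  intro s _
  rw [pvZipFilter]
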